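-- pv_equiv track=rewrite | github.com/jesopo/irctokens | irctokens/protocol.py | _unescape_tag
-- ===== SOURCE A (Python) =====
-- TAG_UNESCAPED = ["\\",   " ",   ";",   "\r",  "\n"]
--
-- TAG_ESCAPED =   ["\\\\", "\\s", "\\:", "\\r", "\\n"]
--
-- def _unescape_tag(value: str):
--     if value.endswith("\\") and not value.endswith("\\\\"):
--         value = value[:-1]
--     parts = value.split("\\\\")
--     for i, piece in enumerate(TAG_ESCAPED):
--         for j, part in enumerate(parts):
--             parts[j] = part.replace(piece, TAG_UNESCAPED[i])
--     return "\\".join(parts)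
-- ===== SOURCE B (Python) =====
-- TAG_MAP = {"\\": "\\", "s": " ", ":": ";", "r": "\r", "n": "\n"}
--
-- def _unescape_tag(value: str):
--     if value.endswith("\\") and not value.endswith("\\\\"):
--         value = value[:-1]
--     out = []
--     i = 0
--     n = len(value)
--     while i < n:
--         c = value[i]
--         if c == "\\" and i + 1 < n and value[i + 1] in TAG_MAP:
--             out.append(TAG_MAP[value[i + 1]])
--             i += 2
--         else:
--             out.append(c)
--             i += 1
--     return "".join(out)
-- ===== Notes on version B (the rewrite author's own statement) =====
-- stated objective: alternative
-- what changed: Replaces A's split-on-double-backslash plus five sequential whole-string replace passes (rejoined with a backslash) by a single left-to-right scan that decodes each two-character escape in one pass and leaves unmatched backslashes literal.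
import Mathlib
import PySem

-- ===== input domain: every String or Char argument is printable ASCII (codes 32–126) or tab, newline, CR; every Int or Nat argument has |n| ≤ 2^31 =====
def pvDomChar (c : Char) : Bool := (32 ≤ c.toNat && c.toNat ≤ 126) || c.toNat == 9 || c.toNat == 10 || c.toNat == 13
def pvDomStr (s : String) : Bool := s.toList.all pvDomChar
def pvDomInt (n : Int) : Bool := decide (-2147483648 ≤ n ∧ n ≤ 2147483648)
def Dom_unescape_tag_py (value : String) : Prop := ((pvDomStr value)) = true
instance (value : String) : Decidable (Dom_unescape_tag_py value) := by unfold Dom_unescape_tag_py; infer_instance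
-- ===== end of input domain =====

-- B replaces A's split-on-"\\" plus five whole-string replace passes by a single left-to-right
-- scan over the characters (alternative decomposition, same cost class; not claimed faster).

-- ===== PORT A =====
def pvTAG_UNESCAPED : List (List Char) := [['\\'], [' '], [';'], ['\r'], ['\n']]
def pvTAG_ESCAPED : List (List Char) := [['\\', '\\'], ['\\', 's'], ['\\', ':'], ['\\', 'r'], ['\\', 'n']]

def unescape_tag_py (value : String) : String :=
  let v : List Char :=
    if PySem.Chars.endswith value.toList ['\\'] && !PySem.Chars.endswith value.toList ['\\', '\\'] then
      PySem.Chars.slice value.toList none (some (-1))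
    else value.toList
  let parts := PySem.Chars.splitOn v ['\\', '\\']
  -- 'for i, piece in enumerate(TAG_ESCAPED): for j, part in enumerate(parts): parts[j] = part.replace(piece, TAG_UNESCAPED[i])'
  let parts := (PySem.List.enumerate pvTAG_ESCAPED).foldl
    (fun ps ip => ps.map (fun p => PySem.Chars.replace p ip.2 (PySem.List.pyGetD pvTAG_UNESCAPED ip.1 [])))
    parts
  String.ofList (PySem.Chars.join ['\\'] parts)

-- ===== PORT B =====
def pvEscChar? (c : Char) : Option Char :=
  if c = '\\' then some '\\'
  else if c = 's' then some ' '
  else if c = ':' then some ';'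
  else if c = 'r' then some '\r'
  else if c = 'n' then some '\n'
  else none

def pvScan : List Char → List Char
  | [] => []
  | c :: t =>
    if c = '\\' then
      match t with
      | d :: t' =>
        match pvEscChar? d with
        | some u => u :: pvScan t'
        | none => '\\' :: pvScan (d :: t')
      | [] => ['\\']
    else c :: pvScan t
termination_by l => l.length
decreasing_by all_goals simp

def unescape_tag_py_alt (value : String) : String :=
  let v : List Char :=
    if PySem.Chars.endswith value.toList ['\\'] && !PySem.Chars.endswith value.toList ['\\', '\\'] then
      PySem.Chars.slice value.toList none (some (-1))
    else value.toList
  String.ofList (pvScan v)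

-- ===== PRECONDITION & SPEC =====
def Spec_unescape_tag_py (value : String) (out : String) : Prop := out = unescape_tag_py_alt value
instance (value : String) (out : String) : Decidable (Spec_unescape_tag_py value out) := by unfold Spec_unescape_tag_py; infer_instance

-- ===== CLAIM (what is proved, stated in full; the proofs are below) =====
def Claim_equal_unescape_tag_py : Prop := ∀ (value : String), Dom_unescape_tag_py value → Spec_unescape_tag_py value (unescape_tag_py value)

-- ===== LEMMAS AND PROOFS =====

def pvSplit : List Char → List (List Char)
  | [] => [[]]
  | '\\' :: '\\' :: t => [] :: pvSplit t
  | c :: t =>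
    match pvSplit t with
    | [] => [[c]]
    | p :: ps => (c :: p) :: ps

theorem pvSplit_ne_nil (l : List Char) : pvSplit l ≠ [] := by
  induction l using pvSplit.induct <;> simp [pvSplit] <;> split <;> simp_all

def pvConsHead (x : List Char) : List (List Char) → List (List Char)
  | [] => [x]
  | p :: ps => (x ++ p) :: ps

theorem pvSplit_go :
    ∀ (fuel : Nat) (l cur : List Char) (accs : List (List Char)), l.length ≤ fuel →
      PySem.Chars.splitOn.go ['\\', '\\'] fuel l cur accs =
        accs.reverse ++ pvConsHead cur.reverse (pvSplit l) := by
  intro fuel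
  induction fuel with
  | zero =>
    intro l cur accs h
    have : l = [] := by cases l <;> simp_all
    subst this
    simp [PySem.Chars.splitOn.go, pvSplit, pvConsHead]
  | succ n ih =>
    intro l cur accs h
    match l with
    | [] => simp [PySem.Chars.splitOn.go, pvSplit, pvConsHead]
    | c :: t =>
      rw [PySem.Chars.splitOn.go]
      by_cases hp : List.isPrefixOf ['\\', '\\'] (c :: t) = true
      · obtain ⟨t', rfl, rfl⟩ : ∃ t', t = '\\' :: t' ∧ c = '\\' := by
          cases t with
          | nil => simp [List.isPrefixOf] at hp
          | cons e t' =>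
            simp [List.isPrefixOf] at hp
            exact ⟨t', by rw [← hp.2], hp.1.symm⟩
        simp only [hp, if_true]
        rw [ih _ _ _ (by simp at h ⊢; omega)]
        simp [pvSplit]
        cases hps : pvSplit t' with
        | nil => exact absurd hps (pvSplit_ne_nil t')
        | cons p ps => simp [pvConsHead]
      · simp only [hp, if_false, Bool.false_eq_true]
        rw [ih _ _ _ (by simp at h ⊢; omega)]
        have : pvSplit (c :: t) = match pvSplit t with | [] => [[c]] | p :: ps => (c :: p) :: ps := by
          rw [pvSplit.eq_def]
          split <;> simp_all [List.isPrefixOf]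
        rw [this]
        cases hps : pvSplit t with
        | nil => exact absurd hps (pvSplit_ne_nil t)
        | cons p ps => simp [pvConsHead]

theorem pvSplitOn_eq (l : List Char) :
    PySem.Chars.splitOn l ['\\', '\\'] = pvSplit l := by
  rw [PySem.Chars.splitOn, pvSplit_go (l.length + 1) l [] [] (by omega)]
  cases hps : pvSplit l with
  | nil => exact absurd hps (pvSplit_ne_nil l)
  | cons p ps => simp [pvConsHead]

def pvRepl (d u : Char) : List Char → List Char
  | [] => []
  | c :: t =>
    match t with
    | e :: t' => if c = '\\' ∧ e = d then u :: pvRepl d u t' else c :: pvRepl d u (e :: t')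
    | [] => [c]

theorem pvReplace_go_spec (d u : Char) :
    ∀ (fuel : Nat) (l acc : List Char), l.length ≤ fuel →
      PySem.Chars.replace.go ['\\', d] [u] fuel l acc = acc.reverse ++ pvRepl d u l := by
  intro fuel
  induction fuel with
  | zero =>
    intro l acc h
    have : l = [] := by cases l <;> simp_all
    subst this
    simp [PySem.Chars.replace.go, pvRepl]
  | succ n ih =>
    intro l acc h
    match l with
    | [] => simp [PySem.Chars.replace.go, pvRepl]
    | c :: t =>
      rw [PySem.Chars.replace.go]
      by_cases hp : List.isPrefixOf ['\\', d] (c :: t) = true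
      · obtain ⟨t', rfl, rfl⟩ : ∃ t', t = d :: t' ∧ c = '\\' := by
          cases t with
          | nil => simp [List.isPrefixOf] at hp
          | cons e t' =>
            simp [List.isPrefixOf] at hp
            exact ⟨t', by rw [← hp.2], hp.1.symm⟩
        simp only [hp, if_true]
        rw [ih _ _ (by simp at h ⊢; omega)]
        simp [pvRepl]
      · simp only [hp, if_false, Bool.false_eq_true]
        rw [ih _ _ (by simp at h ⊢; omega)]
        have : pvRepl d u (c :: t) = c :: pvRepl d u t := by
          rw [pvRepl.eq_def]
          cases t with
          | nil => simp [pvRepl]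
          | cons e t' => simp_all [List.isPrefixOf]; intro h1 h2; simp_all
        rw [this]
        simp

theorem pvReplace_eq (d u : Char) (l : List Char) :
    PySem.Chars.replace l ['\\', d] [u] = pvRepl d u l := by
  rw [PySem.Chars.replace]
  simp only [List.isEmpty_cons, if_false, Bool.false_eq_true]
  rw [pvReplace_go_spec d u l.length l [] (le_refl _)]
  simp

-- head-step lemmas for pvRepl
theorem pvRepl_cons_ne (d u c : Char) (t : List Char) (hc : c ≠ '\\') :
    pvRepl d u (c :: t) = c :: pvRepl d u t := by
  cases t with
  | nil => rfl
  | cons e t' => simp [pvRepl, hc]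

theorem pvRepl_match (d u : Char) (t : List Char) :
    pvRepl d u ('\\' :: d :: t) = u :: pvRepl d u t := by
  simp [pvRepl]

theorem pvRepl_miss (d u e : Char) (t : List Char) (he : e ≠ d) :
    pvRepl d u ('\\' :: e :: t) = '\\' :: pvRepl d u (e :: t) := by
  simp [pvRepl, he]

def pvChain (p : List Char) : List Char :=
  pvRepl 'n' '\n' (pvRepl 'r' '\r' (pvRepl ':' ';' (pvRepl 's' ' ' p)))

theorem pvChain_nil : pvChain [] = [] := rfl

theorem pvChain_single (c : Char) : pvChain [c] = [c] := rfl

theorem pvChain_cons_ne (c : Char) (q : List Char) (hc : c ≠ '\\') :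
    pvChain (c :: q) = c :: pvChain q := by
  simp [pvChain, pvRepl_cons_ne _ _ _ _ hc]

theorem pvChain_esc (d u : Char) (q : List Char) (hdu : pvEscChar? d = some u) (hd : d ≠ '\\') :
    pvChain ('\\' :: d :: q) = u :: pvChain q := by
  have h4 : d = 's' ∨ d = ':' ∨ d = 'r' ∨ d = 'n' := by
    simp [pvEscChar?, hd] at hdu
    split_ifs at hdu <;> simp_all
  rcases h4 with rfl | rfl | rfl | rfl
  · simp [pvEscChar?] at hdu
    subst hdu
    simp only [pvChain]
    rw [pvRepl_match]
    rw [pvRepl_cons_ne ':' ';' ' ' _ (by decide), pvRepl_cons_ne 'r' '\r' ' ' _ (by decide),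
      pvRepl_cons_ne 'n' '\n' ' ' _ (by decide)]
  · simp [pvEscChar?] at hdu
    subst hdu
    simp only [pvChain]
    rw [pvRepl_miss 's' ' ' ':' q (by decide), pvRepl_cons_ne 's' ' ' ':' q (by decide)]
    rw [pvRepl_match]
    rw [pvRepl_cons_ne 'r' '\r' ';' _ (by decide), pvRepl_cons_ne 'n' '\n' ';' _ (by decide)]
  · simp [pvEscChar?] at hdu
    subst hdu
    simp only [pvChain]
    rw [pvRepl_miss 's' ' ' 'r' q (by decide), pvRepl_cons_ne 's' ' ' 'r' q (by decide)]
    rw [pvRepl_miss ':' ';' 'r' _ (by decide), pvRepl_cons_ne ':' ';' 'r' _ (by decide)]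
    rw [pvRepl_match]
    rw [pvRepl_cons_ne 'n' '\n' '\r' _ (by decide)]
  · simp [pvEscChar?] at hdu
    subst hdu
    simp only [pvChain]
    rw [pvRepl_miss 's' ' ' 'n' q (by decide), pvRepl_cons_ne 's' ' ' 'n' q (by decide)]
    rw [pvRepl_miss ':' ';' 'n' _ (by decide), pvRepl_cons_ne ':' ';' 'n' _ (by decide)]
    rw [pvRepl_miss 'r' '\r' 'n' _ (by decide), pvRepl_cons_ne 'r' '\r' 'n' _ (by decide)]
    rw [pvRepl_match]

theorem pvChain_lit (d : Char) (q : List Char) (hd : pvEscChar? d = none) (hbs : d ≠ '\\') :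
    pvChain ('\\' :: d :: q) = '\\' :: d :: pvChain q := by
  have hds : d ≠ 's' ∧ d ≠ ':' ∧ d ≠ 'r' ∧ d ≠ 'n' := by
    simp [pvEscChar?, hbs] at hd
    split_ifs at hd <;> simp_all
  simp [pvChain, pvRepl_miss _ _ _ _ hds.1, pvRepl_cons_ne _ _ _ _ hbs,
    pvRepl_miss _ _ _ _ hds.2.1, pvRepl_miss _ _ _ _ hds.2.2.1, pvRepl_miss _ _ _ _ hds.2.2.2]

theorem pvReplBB_id (p : List Char) (h : List.IsChain (fun a b => ¬(a = '\\' ∧ b = '\\')) p) :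
    pvRepl '\\' '\\' p = p := by
  induction p with
  | nil => rfl
  | cons c t ih =>
    cases t with
    | nil => rfl
    | cons e t' =>
      rw [List.isChain_cons_cons] at h
      have : ¬(c = '\\' ∧ e = '\\') := h.1
      rw [pvRepl.eq_def]
      simp only [this, if_false]
      rw [ih h.2]

theorem pvSplit_step (c : Char) (t : List Char) (h : ¬(c = '\\' ∧ t.head? = some '\\')) :
    pvSplit (c :: t) = pvConsHead [c] (pvSplit t) := by
  rw [pvSplit.eq_def]
  cases t with
  | nil => simp [pvSplit, pvConsHead]
  | cons e t' =>
    by_cases hc : c = '\\' <;> by_cases he : e = '\\' <;> simp_all <;>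
      (cases hps : pvSplit (e :: t') with
       | nil => exact absurd hps (pvSplit_ne_nil _)
       | cons q qs => simp [pvConsHead])

theorem pvSplit_head (t : List Char) (d : Char) (q' : List Char) (qs : List (List Char))
    (h : pvSplit t = (d :: q') :: qs) : t.head? = some d := by
  cases t with
  | nil => simp [pvSplit] at h
  | cons c t2 =>
    by_cases hc : (c = '\\' ∧ t2.head? = some '\\')
    · obtain ⟨rfl, hh⟩ := hc
      cases t2 with
      | nil => simp at hh
      | cons e t3 =>
        simp at hh
        subst hh
        simp [pvSplit] at h
    · rw [pvSplit_step c t2 hc] at h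
      cases hps : pvSplit t2 with
      | nil => exact absurd hps (pvSplit_ne_nil _)
      | cons q qs2 =>
        rw [hps] at h
        simp [pvConsHead] at h
        simp [h.1.1]

theorem pvSplit_chain (l : List Char) :
    ∀ p ∈ pvSplit l, List.IsChain (fun a b => ¬(a = '\\' ∧ b = '\\')) p := by
  generalize hn : l.length = n
  induction n using Nat.strong_induction_on generalizing l with
  | _ n ih =>
    cases l with
    | nil => simp [pvSplit]
    | cons c t =>
      by_cases hc : c = '\\' ∧ t.head? = some '\\'
      · obtain ⟨rfl, hh⟩ := hc
        cases t with
        | nil => simp at hh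
        | cons e t2 =>
          simp only [List.head?_cons, Option.some.injEq] at hh
          subst hh
          intro p hp
          simp only [pvSplit] at hp
          rcases List.mem_cons.mp hp with rfl | hp2
          · exact List.IsChain.nil
          · exact ih t2.length (by simp at hn; omega) t2 rfl p hp2
      · intro p hp
        rw [pvSplit_step c t hc] at hp
        cases hps : pvSplit t with
        | nil => exact absurd hps (pvSplit_ne_nil _)
        | cons q qs =>
          rw [hps] at hp
          simp only [pvConsHead, List.singleton_append] at hp
          have iht := ih t.length (by simp at hn; omega) t rfl
          rcases List.mem_cons.mp hp with rfl | hp2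
          · have hq : List.IsChain (fun a b => ¬(a = '\\' ∧ b = '\\')) q :=
              iht q (by rw [hps]; exact List.mem_cons_self)
            cases q with
            | nil => simp
            | cons y q' =>
              rw [List.isChain_cons_cons]
              refine ⟨?_, hq⟩
              rintro ⟨rfl, rfl⟩
              exact hc ⟨rfl, pvSplit_head t _ _ _ hps⟩
          · exact iht p (by rw [hps]; exact List.mem_cons_of_mem _ hp2)

theorem pvJoin_append_head (sep x p : List Char) (ps : List (List Char)) :
    PySem.Chars.join sep ((x ++ p) :: ps) = x ++ PySem.Chars.join sep (p :: ps) := by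
  cases ps with
  | nil => rw [PySem.Chars.join_singleton, PySem.Chars.join_singleton]
  | cons r rs =>
    rw [PySem.Chars.join_cons_cons, PySem.Chars.join_cons_cons]
    simp [List.append_assoc]

theorem pvScan_cons_ne (c : Char) (t : List Char) (hc : c ≠ '\\') :
    pvScan (c :: t) = c :: pvScan t := by
  rw [pvScan.eq_def]; simp [hc]

theorem pvScan_esc (d u : Char) (t : List Char) (h : pvEscChar? d = some u) :
    pvScan ('\\' :: d :: t) = u :: pvScan t := by
  rw [pvScan.eq_def]; simp [h]

theorem pvScan_lit (d : Char) (t : List Char) (h : pvEscChar? d = none) :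
    pvScan ('\\' :: d :: t) = '\\' :: pvScan (d :: t) := by
  rw [pvScan.eq_def]; simp [h]

theorem pvMain (l : List Char) :
    PySem.Chars.join ['\\'] ((pvSplit l).map pvChain) = pvScan l := by
  induction l using pvScan.induct with
  | case1 => simp [pvSplit, pvChain_nil, PySem.Chars.join_singleton, pvScan]
  | case2 d t' u hu ih =>
    by_cases hd : d = '\\'
    · subst hd
      have hu' : u = '\\' := by simp [pvEscChar?] at hu; exact hu.symm
      subst hu'
      have h2 : pvSplit ('\\' :: '\\' :: t') = [] :: pvSplit t' := by simp [pvSplit]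
      rw [h2]
      obtain ⟨q, qs, hq⟩ : ∃ q qs, pvSplit t' = q :: qs := by
        cases hps : pvSplit t' with
        | nil => exact absurd hps (pvSplit_ne_nil _)
        | cons a b => exact ⟨a, b, rfl⟩
      rw [hq]
      simp only [List.map_cons, pvChain_nil]
      rw [PySem.Chars.join_cons_cons]
      rw [hq] at ih
      simp only [List.map_cons] at ih
      rw [List.nil_append, ih]
      rw [pvScan_esc '\\' '\\' t' (by rfl)]
      rfl
    · obtain ⟨q', qs', hq⟩ : ∃ q' qs', pvSplit t' = q' :: qs' := by
        cases hps : pvSplit t' with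
        | nil => exact absurd hps (pvSplit_ne_nil _)
        | cons a b => exact ⟨a, b, rfl⟩
      have h1 : pvSplit (d :: t') = (d :: q') :: qs' := by
        rw [pvSplit_step d t' (by simp [hd]), hq]; rfl
      have h2 : pvSplit ('\\' :: d :: t') = ('\\' :: d :: q') :: qs' := by
        rw [pvSplit_step '\\' (d :: t') (by simp [hd]), h1]; rfl
      rw [h2]
      simp only [List.map_cons]
      rw [pvChain_esc d u q' hu hd]
      rw [show (u :: pvChain q' : List Char) = [u] ++ pvChain q' from rfl, pvJoin_append_head]
      rw [hq] at ih
      simp only [List.map_cons] at ih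
      rw [ih, pvScan_esc d u t' hu]
      rfl
  | case3 d t' hu ih =>
    have hd : d ≠ '\\' := by intro h; subst h; simp [pvEscChar?] at hu
    obtain ⟨q', qs', hq⟩ : ∃ q' qs', pvSplit t' = q' :: qs' := by
      cases hps : pvSplit t' with
      | nil => exact absurd hps (pvSplit_ne_nil _)
      | cons a b => exact ⟨a, b, rfl⟩
    have h1 : pvSplit (d :: t') = (d :: q') :: qs' := by
      rw [pvSplit_step d t' (by simp [hd]), hq]; rfl
    have h2 : pvSplit ('\\' :: d :: t') = ('\\' :: d :: q') :: qs' := by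
      rw [pvSplit_step '\\' (d :: t') (by simp [hd]), h1]; rfl
    rw [h2]
    simp only [List.map_cons]
    rw [pvChain_lit d q' hu hd]
    rw [show ('\\' :: d :: pvChain q' : List Char) = ['\\'] ++ (d :: pvChain q') from rfl,
      pvJoin_append_head]
    rw [h1] at ih
    simp only [List.map_cons] at ih
    rw [pvChain_cons_ne d q' hd] at ih
    rw [ih, pvScan_lit d t' hu]
    rfl
  | case4 =>
    have h1 : pvSplit ['\\'] = [['\\']] := by rw [pvSplit_step '\\' [] (by simp)]; rfl
    rw [h1]
    simp only [List.map_cons, List.map_nil, pvChain_single]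
    rw [PySem.Chars.join_singleton]
    rw [pvScan.eq_def]
    simp
  | case5 c t hc ih =>
    obtain ⟨q, qs, hq⟩ : ∃ q qs, pvSplit t = q :: qs := by
      cases hps : pvSplit t with
      | nil => exact absurd hps (pvSplit_ne_nil _)
      | cons a b => exact ⟨a, b, rfl⟩
    have h1 : pvSplit (c :: t) = (c :: q) :: qs := by
      rw [pvSplit_step c t (by simp [hc]), hq]; rfl
    rw [h1]
    simp only [List.map_cons]
    rw [pvChain_cons_ne c q hc]
    rw [show (c :: pvChain q : List Char) = [c] ++ pvChain q from rfl, pvJoin_append_head]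
    rw [hq] at ih
    simp only [List.map_cons] at ih
    rw [ih, pvScan_cons_ne c t hc]
    rfl

theorem pvPipeline (v : List Char) :
    PySem.Chars.join ['\\']
      ((PySem.List.enumerate pvTAG_ESCAPED).foldl
        (fun ps ip => ps.map (fun p => PySem.Chars.replace p ip.2 (PySem.List.pyGetD pvTAG_UNESCAPED ip.1 [])))
        (PySem.Chars.splitOn v ['\\', '\\'])) = pvScan v := by
  rw [pvSplitOn_eq]
  rw [show PySem.List.enumerate pvTAG_ESCAPED =
    [((0 : Int), ['\\', '\\']), (1, ['\\', 's']), (2, ['\\', ':']), (3, ['\\', 'r']), (4, ['\\', 'n'])] from by decide]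
  simp only [List.foldl_cons, List.foldl_nil]
  rw [show PySem.List.pyGetD pvTAG_UNESCAPED 0 [] = ['\\'] from by decide,
    show PySem.List.pyGetD pvTAG_UNESCAPED 1 [] = [' '] from by decide,
    show PySem.List.pyGetD pvTAG_UNESCAPED 2 [] = [';'] from by decide,
    show PySem.List.pyGetD pvTAG_UNESCAPED 3 [] = ['\r'] from by decide,
    show PySem.List.pyGetD pvTAG_UNESCAPED 4 [] = ['\n'] from by decide]
  simp only [pvReplace_eq, List.map_map]
  refine Eq.trans (congrArg (PySem.Chars.join ['\\']) (List.map_congr_left (g := pvChain) ?_)) (pvMain v)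
  intro p hp
  simp only [Function.comp]
  rw [pvReplBB_id p (pvSplit_chain v p hp)]
  rfl

-- ===== VERDICT (by name: the statement is the Claim_ definition above) =====
theorem unescape_tag_py_spec : Claim_equal_unescape_tag_py := by
  intro value _
  unfold Spec_unescape_tag_py unescape_tag_py unescape_tag_py_alt
  exact congrArg String.ofList (pvPipeline _)
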